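-- pv_equiv track=rewrite | github.com/CyrilRPG/bulletinspaes | generate_bulletins.py | capitalize_name
-- ===== SOURCE A (Python) =====
-- def capitalize_name(name):
--     """Met la premiere lettre de chaque partie du nom en majuscule,
--     en preservant les particules et tirets"""
--     if not name:
--         return ""
--     # Traiter chaque partie separee par un espace
--     parts = name.strip().split()
--     result = []
--     for part in parts:
--         # Gerer les tirets composes (ex: Jean-Baptiste)
--         if '-' in part:
--             sub = part.split('-')
--             result.append('-'.join(s[0].upper() + s[1:].lower() if s else s for s in sub))
--         else:
--             result.append(part[0].upper() + part[1:].lower() if part else part)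
--     return ' '.join(result)
-- ===== SOURCE B (Python) =====
-- def capitalize_name(name):
--     if not name:
--         return ""
--     normalized = ' '.join(name.strip().split())
--     out = []
--     prev_sep = True
--     for c in normalized:
--         if c == ' ' or c == '-':
--             out.append(c)
--             prev_sep = True
--         elif prev_sep:
--             out.append(c.upper())
--             prev_sep = False
--         else:
--             out.append(c.lower())
--             prev_sep = False
--     return ''.join(out)
-- ===== Notes on version B (the rewrite author's own statement) =====
-- stated objective: simpler
-- what changed: Replaced the nested split-on-space/split-on-hyphen decomposition with whitespace normalization followed by one flat character scan that tracks whether the previous character was a separator.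
import Mathlib
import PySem

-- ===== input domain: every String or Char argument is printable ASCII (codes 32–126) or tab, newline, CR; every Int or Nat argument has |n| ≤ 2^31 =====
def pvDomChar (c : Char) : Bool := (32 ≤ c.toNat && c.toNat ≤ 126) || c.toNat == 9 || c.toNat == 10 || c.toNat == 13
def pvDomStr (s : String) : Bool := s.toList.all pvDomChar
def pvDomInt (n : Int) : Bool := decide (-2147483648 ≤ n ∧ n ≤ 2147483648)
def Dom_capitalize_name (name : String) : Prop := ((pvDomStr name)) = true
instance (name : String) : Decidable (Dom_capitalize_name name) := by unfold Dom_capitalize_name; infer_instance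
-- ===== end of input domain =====

-- B is simpler: one flat separator-tracking character scan instead of nested split-on-space / split-on-hyphen passes (same cost).

-- ===== PORT A =====
-- per-part 's[0].upper() + s[1:].lower() if s else s'
def capPartA (s : List Char) : List Char :=
  match s with
  | [] => []
  | c :: r => PySem.Chars.upperChar c :: PySem.Chars.lower r

def capitalize_name (name : String) : String :=
  if name = "" then ""
  else
    String.ofList (PySem.Chars.join [' ']
      ((PySem.Chars.split₀ (PySem.Chars.strip name.toList)).foldl (fun acc part =>
        acc ++ [if PySem.Chars.isIn ['-'] part then
                  PySem.Chars.join ['-'] ((PySem.Chars.splitOn part ['-']).map capPartA)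
                else capPartA part]) []))

-- ===== PORT B =====
-- the for-loop of Source B: state (prev_sep, out)
def scanStep (st : Bool × List Char) (c : Char) : Bool × List Char :=
  if c = ' ' || c = '-' then (true, st.2 ++ [c])
  else if st.1 then (false, st.2 ++ [PySem.Chars.upperChar c])
  else (false, st.2 ++ [PySem.Chars.lowerChar c])

def capitalize_name_alt (name : String) : String :=
  if name = "" then ""
  else
    String.ofList ((PySem.Chars.join [' ']
      (PySem.Chars.split₀ (PySem.Chars.strip name.toList))).foldl scanStep (true, [])).2

-- ===== PRECONDITION & SPEC =====
def Spec_capitalize_name (name : String) (out : String) : Prop := out = capitalize_name_alt name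
instance (name : String) (out : String) : Decidable (Spec_capitalize_name name out) := by unfold Spec_capitalize_name; infer_instance

-- ===== CLAIM (what is proved, stated in full; the proofs are below) =====
def Claim_equal_capitalize_name : Prop := ∀ (name : String), Dom_capitalize_name name → Spec_capitalize_name name (capitalize_name name)

-- ===== LEMMAS AND PROOFS =====

-- recursive form of B's scan
def scanCap : Bool → List Char → List Char
  | _, [] => []
  | prev, c :: rest =>
    if c = ' ' || c = '-' then c :: scanCap true rest
    else if prev then PySem.Chars.upperChar c :: scanCap false rest
    else PySem.Chars.lowerChar c :: scanCap false rest

theorem foldl_scanStep (cs : List Char) : ∀ (b : Bool) (acc : List Char),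
    (cs.foldl scanStep (b, acc)).2 = acc ++ scanCap b cs := by
  induction cs with
  | nil => intro b acc; simp [scanCap]
  | cons c rest ih =>
    intro b acc
    simp only [List.foldl_cons, scanStep, scanCap]
    by_cases h : c = ' ' ∨ c = '-'
    · have : (c = ' ' || c = '-') = true := by rcases h with h | h <;> simp [h]
      simp [this, ih]
    · simp only [not_or] at h
      have : (c = ' ' || c = '-') = false := by simp [h.1, h.2]
      cases b <;> simp [this, ih]

-- structural split-on-'-'
def mySplit : List Char → List (List Char)
  | [] => [[]]
  | c :: r =>
    if c = '-' then [] :: mySplit r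
    else
      match mySplit r with
      | [] => [[c]]
      | p :: ps => (c :: p) :: ps

theorem mySplit_ne_nil (l : List Char) : mySplit l ≠ [] := by
  cases l with
  | nil => simp [mySplit]
  | cons c r =>
    simp only [mySplit]
    split
    · simp
    · split <;> simp_all

theorem mySplit_no_dash (p : List Char) (h : '-' ∉ p) : mySplit p = [p] := by
  induction p with
  | nil => simp [mySplit]
  | cons c r ih =>
    have hc : c ≠ '-' := fun hc => h (hc ▸ List.mem_cons_self)
    have hr : '-' ∉ r := fun hm => h (List.mem_cons_of_mem _ hm)
    simp [mySplit, hc, ih hr]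

-- splitOn.go with sep = ['-'] computes mySplit
theorem splitOn_go_eq (fuel : Nat) : ∀ (l cur : List Char) (acc : List (List Char)),
    l.length < fuel →
    PySem.Chars.splitOn.go ['-'] fuel l cur acc =
      acc.reverse ++ (match mySplit l with
        | [] => []
        | p :: ps => (cur.reverse ++ p) :: ps) := by
  induction fuel with
  | zero => intro l cur acc h; omega
  | succ fuel ih =>
    intro l cur acc h
    cases l with
    | nil => simp [PySem.Chars.splitOn.go, mySplit]
    | cons c rest =>
      simp only [PySem.Chars.splitOn.go]
      by_cases hc : c = '-'
      · have hpf : List.isPrefixOf ['-'] (c :: rest) = true := by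
          simp [List.isPrefixOf, hc]
        rw [if_pos hpf]
        have hdrop : List.drop (['-'] : List Char).length (c :: rest) = rest := rfl
        rw [hdrop]
        simp only [List.length_cons] at h
        rw [ih rest [] (cur.reverse :: acc) (by omega)]
        have := mySplit_ne_nil rest
        cases hms : mySplit rest with
        | nil => exact absurd hms this
        | cons p ps => simp [mySplit, hc, hms]
      · have hpf : List.isPrefixOf ['-'] (c :: rest) = false := by
          simp [List.isPrefixOf]; exact fun h' => hc h'.symm
        rw [if_neg (by simp [hpf])]
        simp only [List.length_cons] at h
        rw [ih rest (c :: cur) acc (by omega)]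
        have := mySplit_ne_nil rest
        cases hms : mySplit rest with
        | nil => exact absurd hms this
        | cons p ps => simp [mySplit, hc, hms]

theorem splitOn_eq_mySplit (l : List Char) :
    PySem.Chars.splitOn l ['-'] =
      (match mySplit l with | [] => [] | p :: ps => p :: ps) := by
  unfold PySem.Chars.splitOn
  rw [splitOn_go_eq (l.length + 1) l [] [] (by omega)]
  cases mySplit l <;> simp

-- capDash: token-capitalisation with '-' as separator, state = at token start
def capDash : Bool → List Char → List Char
  | _, [] => []
  | b, c :: r =>
    if c = '-' then '-' :: capDash true r
    else (if b then PySem.Chars.upperChar c else PySem.Chars.lowerChar c) :: capDash false r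

def tailJoin (ps : List (List Char)) : List Char :=
  (ps.map (fun s => '-' :: capPartA s)).flatten

theorem capDash_mySplit (l : List Char) :
    (∀ p ps, mySplit l = p :: ps →
      capDash true l = capPartA p ++ tailJoin ps ∧
      capDash false l = PySem.Chars.lower p ++ tailJoin ps) := by
  induction l with
  | nil =>
    intro p ps h
    simp only [mySplit] at h
    injection h with h1 h2
    subst h1; subst h2
    simp [capDash, capPartA, tailJoin, PySem.Chars.lower]
  | cons c r ih =>
    intro p ps h
    by_cases hc : c = '-'
    · subst hc
      simp only [mySplit, if_true] at h
      obtain ⟨hp, hps⟩ := List.cons.inj h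
      subst hp hps
      have := mySplit_ne_nil r
      cases hms : mySplit r with
      | nil => exact absurd hms this
      | cons q qs =>
        have ⟨h1, _⟩ := ih q qs hms
        constructor <;>
          simp [capDash, capPartA, tailJoin, PySem.Chars.lower, h1]
    · have := mySplit_ne_nil r
      cases hms : mySplit r with
      | nil => exact absurd hms this
      | cons q qs =>
        simp only [mySplit, if_neg hc, hms] at h
        obtain ⟨hp, hps⟩ := List.cons.inj h
        subst hp hps
        have ⟨_, h2⟩ := ih q qs hms
        constructor <;> simp [capDash, hc, capPartA, PySem.Chars.lower, h2]

theorem join_dash_eq (q : List Char) (ps : List (List Char)) :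
    PySem.Chars.join ['-'] (capPartA q :: ps.map capPartA) = capPartA q ++ tailJoin ps := by
  induction ps generalizing q with
  | nil => simp [PySem.Chars.join_singleton, tailJoin]
  | cons a as ih =>
    rw [List.map_cons, PySem.Chars.join_cons_cons, ih a]
    simp [tailJoin]

-- A's per-part value in capDash form
theorem capA_eq_capDash (p : List Char) :
    (if PySem.Chars.isIn ['-'] p then
        PySem.Chars.join ['-'] ((PySem.Chars.splitOn p ['-']).map capPartA)
      else capPartA p) = capDash true p := by
  have hne := mySplit_ne_nil p
  cases hms : mySplit p with
  | nil => exact absurd hms hne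
  | cons q qs =>
    have ⟨h1, _⟩ := capDash_mySplit p q qs hms
    by_cases hd : PySem.Chars.isIn ['-'] p = true
    · rw [if_pos hd, splitOn_eq_mySplit, hms]
      rw [List.map_cons, join_dash_eq, h1]
    · rw [if_neg hd]
      have hmem : '-' ∉ p := by
        intro hm
        exact hd ((PySem.Chars.isIn_iff_infix ['-'] p).mpr
          ((List.singleton_infix_iff '-' p).mpr hm))
      have hsp := mySplit_no_dash p hmem
      rw [hsp] at hms
      obtain ⟨hq, hqs⟩ := List.cons.inj hms
      subst hq hqs
      rw [h1]
      simp [tailJoin]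

-- scanCap = capDash on space-free input
theorem scanCap_eq_capDash (p : List Char) (hp : ∀ c ∈ p, c ≠ ' ') :
    ∀ b, scanCap b p = capDash b p := by
  induction p with
  | nil => intro b; simp [scanCap, capDash]
  | cons c r ih =>
    intro b
    have hc : c ≠ ' ' := hp c List.mem_cons_self
    have hr : ∀ x ∈ r, x ≠ ' ' := fun x hx => hp x (List.mem_cons_of_mem _ hx)
    by_cases hd : c = '-'
    · simp [scanCap, capDash, hd, ih hr]
    · cases b <;> simp [scanCap, capDash, hc, hd, ih hr]

-- scanning past a space resets the state
theorem scanCap_append_space (xs ys : List Char) :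
    ∀ b, scanCap b (xs ++ ' ' :: ys) = scanCap b xs ++ ' ' :: scanCap true ys := by
  induction xs with
  | nil => intro b; simp [scanCap]
  | cons c r ih =>
    intro b
    by_cases h : c = ' ' ∨ c = '-'
    · have : (c = ' ' || c = '-') = true := by rcases h with h | h <;> simp [h]
      simp [scanCap, this, ih]
    · simp only [not_or] at h
      have : (c = ' ' || c = '-') = false := by simp [h.1, h.2]
      cases b <;> simp [scanCap, this, ih]

-- the main bridge: scanning the space-joined parts = joining the per-part results
theorem scan_join (parts : List (List Char))
    (h : ∀ p ∈ parts, ∀ c ∈ p, PySem.Chars.isspace c = false) :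
    scanCap true (PySem.Chars.join [' '] parts) =
      PySem.Chars.join [' ']
        (parts.map (fun part =>
          if PySem.Chars.isIn ['-'] part then
            PySem.Chars.join ['-'] ((PySem.Chars.splitOn part ['-']).map capPartA)
          else capPartA part)) := by
  induction parts with
  | nil => rw [List.map_nil, PySem.Chars.join_nil]; simp [scanCap]
  | cons p rest ih =>
    have hp : ∀ c ∈ p, c ≠ ' ' := by
      intro c hc he
      have := h p List.mem_cons_self c hc
      rw [he] at this
      simp [PySem.Chars.isspace] at this
    have hrest : ∀ q ∈ rest, ∀ c ∈ q, PySem.Chars.isspace c = false :=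
      fun q hq => h q (List.mem_cons_of_mem _ hq)
    cases rest with
    | nil =>
      rw [List.map_cons, List.map_nil, PySem.Chars.join_singleton,
        PySem.Chars.join_singleton, scanCap_eq_capDash p hp, capA_eq_capDash]
    | cons q qs =>
      rw [PySem.Chars.join_cons_cons]
      have hassoc : p ++ [' '] ++ PySem.Chars.join [' '] (q :: qs) =
          p ++ ' ' :: PySem.Chars.join [' '] (q :: qs) := by
        simp
      rw [hassoc, scanCap_append_space, ih hrest, scanCap_eq_capDash p hp]
      conv_rhs => rw [List.map_cons, List.map_cons, PySem.Chars.join_cons_cons]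
      simp only [capA_eq_capDash]
      simp

-- the foldl-append loop of A is a map
theorem foldl_append_map (l : List (List Char)) (f : List Char → List Char) :
    ∀ acc, l.foldl (fun acc part => acc ++ [f part]) acc = acc ++ l.map f := by
  induction l with
  | nil => intro acc; simp
  | cons p rest ih => intro acc; simp [ih]

-- every part of split₀ is whitespace-free
theorem split₀_go_no_space (l : List Char) :
    ∀ (cur : List Char) (acc : List (List Char)),
      (∀ c ∈ cur, PySem.Chars.isspace c = false) →
      (∀ p ∈ acc, ∀ c ∈ p, PySem.Chars.isspace c = false) →
      ∀ p ∈ PySem.Chars.split₀.go l cur acc, ∀ c ∈ p, PySem.Chars.isspace c = false := by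
  induction l with
  | nil =>
    intro cur acc hcur hacc p hp
    simp only [PySem.Chars.split₀.go] at hp
    split at hp
    · simp only [List.mem_reverse] at hp
      exact hacc p hp
    · simp only [List.mem_reverse, List.mem_cons] at hp
      rcases hp with hp | hp
      · subst hp; intro c hc; exact hcur c (List.mem_reverse.mp hc)
      · exact hacc p hp
  | cons c rest ih =>
    intro cur acc hcur hacc p hp
    simp only [PySem.Chars.split₀.go] at hp
    split at hp
    · split at hp
      · exact ih [] acc (by simp) hacc p hp
      · refine ih [] (cur.reverse :: acc) (by simp) ?_ p hp
        intro q hq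
        rcases List.mem_cons.mp hq with hq | hq
        · subst hq; intro x hx; exact hcur x (List.mem_reverse.mp hx)
        · exact hacc q hq
    · rename_i hsp
      refine ih (c :: cur) acc ?_ hacc p hp
      intro x hx
      rcases List.mem_cons.mp hx with hx | hx
      · subst hx; simpa using hsp
      · exact hcur x hx

theorem split₀_no_space (l : List Char) :
    ∀ p ∈ PySem.Chars.split₀ l, ∀ c ∈ p, PySem.Chars.isspace c = false := by
  unfold PySem.Chars.split₀
  exact split₀_go_no_space l [] [] (by simp) (by simp)

-- ===== VERDICT (by name: the statement is the Claim_ definition above) =====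
theorem capitalize_name_spec : Claim_equal_capitalize_name := by
  intro name _
  unfold Spec_capitalize_name capitalize_name capitalize_name_alt
  by_cases h : name = ""
  · simp [h]
  · rw [if_neg h, if_neg h]
    rw [foldl_scanStep, foldl_append_map]
    rw [scan_join _ (split₀_no_space _)]
    simp
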